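-- pv_equiv track=rewrite | github.com/SDET-SOLOMAN/code_wars_python | kata_6s/ascend_descend_repeat.py | ascend_descend2
-- ===== SOURCE A (Python) =====
-- def ascend_descend2(l, mini, maxi):
--     new_s = ''
--
--     if mini > maxi:
--         return ''
--
--     for char in range(0, l):
--         new_s += ''.join(str(x) for x in range(mini, maxi + 1))
--         new_s += ''.join(str(x) for x in range(maxi - 1, mini, -1))
--     return new_s[:l]
-- ===== SOURCE B (Python) =====
-- def ascend_descend2(l, mini, maxi):
--     if mini > maxi or l <= 0:
--         return ''
--     nums = list(range(mini, maxi + 1)) + list(range(maxi - 1, mini, -1))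
--     block = ''.join(str(x) for x in nums)
--     n = len(block)
--     return ''.join(block[i % n] for i in range(l))
-- ===== Notes on version B (the rewrite author's own statement) =====
-- stated objective: alternative
-- what changed: B renders the ascend-descend block once from a single concatenated number list and produces the l output characters by cyclic modular indexing into that block, instead of A's loop that re-renders and appends the block l times and truncates at the end.
import Mathlib
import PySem

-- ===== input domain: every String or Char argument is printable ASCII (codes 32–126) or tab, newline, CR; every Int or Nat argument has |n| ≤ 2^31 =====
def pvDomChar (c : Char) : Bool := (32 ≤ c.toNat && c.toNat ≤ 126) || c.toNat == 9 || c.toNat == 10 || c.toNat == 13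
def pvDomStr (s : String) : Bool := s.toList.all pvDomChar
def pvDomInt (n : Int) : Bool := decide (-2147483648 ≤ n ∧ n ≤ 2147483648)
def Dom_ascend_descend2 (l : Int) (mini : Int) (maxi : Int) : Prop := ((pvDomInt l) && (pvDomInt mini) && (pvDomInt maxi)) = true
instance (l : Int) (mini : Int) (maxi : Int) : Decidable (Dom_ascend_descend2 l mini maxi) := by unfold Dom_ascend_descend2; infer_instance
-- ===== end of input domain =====

-- B builds one ascend-descend digit block from a single concatenated number list and reads the l output
-- characters by cyclic (modular) indexing into it, instead of A's loop that re-renders and appends the block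
-- l times and truncates at the end (objective: alternative).

-- ===== PORT A =====
def ascend_descend2 (l : Int) (mini : Int) (maxi : Int) : String :=
  if mini > maxi then "" else
    let new_s : List Char :=
      (PySem.List.pyRange 0 l 1).foldl (fun s _ =>
        (s ++ PySem.Chars.join [] ((PySem.List.pyRange mini (maxi + 1) 1).map PySem.Int.toChars))
          ++ PySem.Chars.join [] ((PySem.List.pyRange (maxi - 1) mini (-1)).map PySem.Int.toChars)) []
    String.ofList (PySem.List.slice new_s none (some l))

-- ===== PORT B =====
def ascend_descend2_alt (l : Int) (mini : Int) (maxi : Int) : String :=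
  if mini > maxi ∨ l ≤ 0 then "" else
    let nums : List Int :=
      PySem.List.pyRange mini (maxi + 1) 1 ++ PySem.List.pyRange (maxi - 1) mini (-1)
    let block : List Char := PySem.Chars.join [] (nums.map PySem.Int.toChars)
    let n : Nat := block.length
    -- block[i % n]: n > 0 here and i % n < n, so Python never raises; getD with a dummy default is exact
    String.ofList ((List.range l.toNat).map (fun i => block.getD (i % n) ' '))

-- ===== PRECONDITION & SPEC =====
def Spec_ascend_descend2 (l : Int) (mini : Int) (maxi : Int) (out : String) : Prop := out = ascend_descend2_alt l mini maxi
instance (l : Int) (mini : Int) (maxi : Int) (out : String) : Decidable (Spec_ascend_descend2 l mini maxi out) := by unfold Spec_ascend_descend2; infer_instance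

-- ===== CLAIM (what is proved, stated in full; the proofs are below) =====
def Claim_equal_ascend_descend2 : Prop := ∀ (l : Int) (mini : Int) (maxi : Int), Dom_ascend_descend2 l mini maxi → Spec_ascend_descend2 l mini maxi (ascend_descend2 l mini maxi)

-- ===== LEMMAS AND PROOFS =====

-- ''.join(pieces) is the flat concatenation of the pieces
lemma join_nil_eq_flatten (xs : List (List Char)) : PySem.Chars.join [] xs = xs.flatten := by
  simp only [PySem.Chars.join, List.intercalate]
  induction xs with
  | nil => rfl
  | cons x xs ih => cases xs <;> simp_all

-- str(n) is never the empty string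
lemma toDigitsCore_len_ge (b : Nat) : ∀ (f n : Nat) (acc : List Char), acc.length ≤ (Nat.toDigitsCore b f n acc).length := by
  intro f
  induction f with
  | zero => intro n acc; simp [Nat.toDigitsCore]
  | succ f ih =>
      intro n acc
      simp only [Nat.toDigitsCore]
      split
      · simp
      · exact le_trans (by simp) (ih (n / b) (Nat.digitChar (n % b) :: acc))

lemma toChars_ne_nil (n : Int) : PySem.Int.toChars n ≠ [] := by
  unfold PySem.Int.toChars
  split
  · simp
  · simp only [Nat.toDigits, Nat.toDigitsCore]
    split
    · simp
    · intro h
      have := toDigitsCore_len_ge 10 n.toNat (n.toNat / 10) [Nat.digitChar (n.toNat % 10)]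
      simp [h] at this

-- A's loop: each iteration appends the two joined pieces
lemma foldl_append2_eq_flatten_replicate {α : Type} (u v : List Char) :
    ∀ (xs : List α) (init : List Char),
      xs.foldl (fun s _ => (s ++ u) ++ v) init = init ++ (List.replicate xs.length (u ++ v)).flatten := by
  intro xs
  induction xs with
  | nil => intro init; simp
  | cons x xs ih =>
      intro init
      simp only [List.foldl_cons, List.length_cons, List.replicate_succ, List.flatten_cons]
      rw [ih ((init ++ u) ++ v)]
      simp [List.append_assoc]

-- reading position i of enough repeated copies of B is cyclic indexing into B
lemma getD_flatten_replicate (B : List Char) :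
    ∀ (a i : Nat), i < a * B.length →
      (List.replicate a B).flatten.getD i ' ' = B.getD (i % B.length) ' ' := by
  intro a
  induction a with
  | zero => intro i h; omega
  | succ a ih =>
      intro i h
      simp only [List.replicate_succ, List.flatten_cons]
      by_cases hi : i < B.length
      · rw [List.getD_eq_getElem?_getD, List.getElem?_append_left hi,
            Nat.mod_eq_of_lt hi, ← List.getD_eq_getElem?_getD]
      · rw [not_lt] at hi
        rw [List.getD_eq_getElem?_getD, List.getElem?_append_right hi,
            ← List.getD_eq_getElem?_getD, Nat.mod_eq_sub_mod hi]
        exact ih (i - B.length) (by rw [Nat.succ_mul] at h; omega)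

-- the first n chars of enough repeated copies of B are the cyclic read-out
lemma take_flatten_replicate_eq_map_range (B : List Char)
    (a n : Nat) (h : n ≤ a * B.length) :
    (List.replicate a B).flatten.take n = (List.range n).map (fun i => B.getD (i % B.length) ' ') := by
  have hlen : ((List.replicate a B).flatten).length = a * B.length := by
    simp [List.length_flatten]
  apply List.ext_getElem
  · simp [hlen]; omega
  · intro i h1 h2
    simp only [List.getElem_take, List.getElem_map, List.getElem_range]
    simp only [List.length_take, hlen] at h1
    exact (List.getD_eq_getElem _ _ _).symm.trans (getD_flatten_replicate B a i (by omega))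

-- ===== VERDICT (by name: the statement is the Claim_ definition above) =====
theorem ascend_descend2_spec : Claim_equal_ascend_descend2 := by
  intro l mini maxi _hdom
  unfold Spec_ascend_descend2 ascend_descend2 ascend_descend2_alt
  by_cases hmm : mini > maxi
  · simp [hmm]
  · simp only [hmm, if_false]
    by_cases hl : l ≤ 0
    · rw [if_pos (Or.inr hl)]
      rw [PySem.List.pyRange_one_eq_nil hl]
      simp [PySem.List.slice]
    · rw [if_neg (by simpa using hl : ¬(False ∨ l ≤ 0))]
      replace hl : 0 < l := by omega
      set asc := (PySem.List.pyRange mini (maxi + 1) 1).map PySem.Int.toChars with hasc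
      set desc := (PySem.List.pyRange (maxi - 1) mini (-1)).map PySem.Int.toChars with hdesc
      have hblock : PySem.Chars.join []
          (((PySem.List.pyRange mini (maxi + 1) 1) ++ (PySem.List.pyRange (maxi - 1) mini (-1))).map PySem.Int.toChars)
          = asc.flatten ++ desc.flatten := by
        rw [List.map_append, join_nil_eq_flatten, List.flatten_append]
      have hBne : 0 < (asc.flatten ++ desc.flatten).length := by
        have : asc ≠ [] := by
          rw [hasc, PySem.List.pyRange_one_cons (by omega : mini < maxi + 1)]
          simp
        obtain ⟨x, xs, hx⟩ := List.exists_cons_of_ne_nil this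
        have hxne : x ≠ [] := by
          have : x ∈ asc := by rw [hx]; exact List.mem_cons_self
          rw [hasc] at this
          obtain ⟨m, _, hm⟩ := List.mem_map.mp this
          rw [← hm]; exact toChars_ne_nil m
        have := List.length_pos_of_ne_nil hxne
        simp [hx]
        omega
      rw [hblock, join_nil_eq_flatten, join_nil_eq_flatten,
          foldl_append2_eq_flatten_replicate, List.nil_append,
          PySem.List.length_pyRange_one, PySem.List.slice_to _ (le_of_lt hl)]
      congr 1
      have hcount : l.toNat ≤ (l - 0).toNat * (asc.flatten ++ desc.flatten).length := by
        have := Nat.le_mul_of_pos_right l.toNat hBne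
        simpa using this
      simpa using take_flatten_replicate_eq_map_range (asc.flatten ++ desc.flatten)
        (l - 0).toNat l.toNat hcount
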